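-- pv_equiv track=rewrite | github.com/dzjxzyd/R-PeptideCutter | R-PeptideCutter_for_two_enzymes.py | Staphylococcal_peptidase_I
-- ===== SOURCE A (Python) =====
-- def Staphylococcal_peptidase_I(seq,seq_len):
--     cleavage=[]
--     for i in range(seq_len):
--         if i < seq_len-1:
--             if i==0:
--                 if seq[i]== 'E':
--                     cleavage.append(i)
--             if seq[i]!='E':
--                 if seq[i+1]== 'E':
--                     cleavage.append(i+1)
--     return cleavage
-- ===== SOURCE B (Python) =====
-- def Staphylococcal_peptidase_I(seq, seq_len):
--     # Two-stage run-length-encoding approach: compress the considered prefix into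
--     # maximal (char, count) runs, then the cleavage sites are the start offsets of
--     # the 'E' runs (prefix sums of the run lengths).
--     s = seq[:max(seq_len, 0)]
--     runs = []
--     for ch in s:
--         if runs and runs[-1][0] == ch:
--             runs[-1][1] += 1
--         else:
--             runs.append([ch, 1])
--     out, pos = [], 0
--     for ch, k in runs:
--         if ch == 'E':
--             out.append(pos)
--         pos += k
--     return out
-- ===== Notes on version B (the rewrite author's own statement) =====
-- stated objective: alternative
-- what changed: Replaces A's index loop over i/i+1 neighbor comparisons by a two-stage pipeline: run-length encode the prefix into (char,count) runs, then emit the prefix-sum start offsets of the 'E' runs.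
-- intended difference: For seq_len == 1 with seq starting with 'E', A returns [] because its whole loop body is guarded by i < seq_len-1, while B returns [0], the intended cleavage site consistent with A's own leading-'E' rule for longer sequences. — e.g. on Staphylococcal_peptidase_I("E", 1): A returns [], B returns [0]
import Mathlib
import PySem

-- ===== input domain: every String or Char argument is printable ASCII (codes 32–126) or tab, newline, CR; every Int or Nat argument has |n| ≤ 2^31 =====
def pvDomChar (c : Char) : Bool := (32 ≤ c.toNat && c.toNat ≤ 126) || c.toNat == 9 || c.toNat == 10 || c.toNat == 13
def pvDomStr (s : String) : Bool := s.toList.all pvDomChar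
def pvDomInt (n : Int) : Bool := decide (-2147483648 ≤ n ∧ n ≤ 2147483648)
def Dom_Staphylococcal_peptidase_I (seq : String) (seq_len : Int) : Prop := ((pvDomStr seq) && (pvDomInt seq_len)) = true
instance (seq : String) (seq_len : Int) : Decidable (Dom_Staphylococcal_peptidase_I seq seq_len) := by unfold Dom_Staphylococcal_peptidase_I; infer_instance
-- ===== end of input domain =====

-- B replaces A's index loop (dual appends, i/i+1 pair arithmetic) by a two-stage pipeline:
-- run-length encode the prefix, then emit the prefix-sum start offsets of the 'E' runs
-- (objective: alternative); on seq_len == 1 with a leading 'E', B returns the intended [0]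
-- where A returns [] (see D_ below).


-- ===== PORT A =====
-- literal transliteration of A's loop; seq[i] is PySem.List.pyGetD (in-range under Pre_)
def Staphylococcal_peptidase_I (seq : String) (seq_len : Int) : List Int :=
  (PySem.List.pyRange 0 seq_len 1).foldl (fun cleavage i =>
    if i < seq_len - 1 then
      let cleavage1 :=
        if i = 0 then
          (if PySem.List.pyGetD seq.toList i ' ' = 'E' then cleavage ++ [i] else cleavage)
        else cleavage
      if PySem.List.pyGetD seq.toList i ' ' ≠ 'E' then
        (if PySem.List.pyGetD seq.toList (i + 1) ' ' = 'E' then cleavage1 ++ [i + 1] else cleavage1)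
      else cleavage1
    else cleavage) []

-- ===== PORT B =====
-- Source B stage 1 body: extend the last run or start a new one (runs[-1][1] += 1 / append)
def pvAddCh (runs : List (Char × Nat)) (ch : Char) : List (Char × Nat) :=
  match runs.getLast? with
  | some (c, k) => if c = ch then runs.dropLast ++ [(c, k + 1)] else runs ++ [(ch, 1)]
  | none => [(ch, 1)]

-- transliteration of Source B: slice the prefix, run-length encode it, then fold the runs
-- accumulating (out, pos) and keep out
def Staphylococcal_peptidase_I_alt (seq : String) (seq_len : Int) : List Int :=
  let s := PySem.List.slice seq.toList none (some (max seq_len 0))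
  let runs := s.foldl pvAddCh []
  (runs.foldl (fun (st : List Int × Int) r =>
      ((if r.1 = 'E' then st.1 ++ [st.2] else st.1), st.2 + (r.2 : Int))) ([], 0)).1

-- ===== PRECONDITION & SPEC =====
-- Pre_ is exactly where the Python A returns without IndexError: the loop reads seq[i] for
-- i < seq_len-1 and seq[i+1] when seq[i] ≠ 'E', so A returns iff seq_len ≤ 1, or
-- seq_len ≤ len(seq), or seq_len = len(seq)+1 with the last character 'E' (the guard skips
-- the out-of-range read).
def Pre_Staphylococcal_peptidase_I (seq : String) (seq_len : Int) : Prop :=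
  seq_len ≤ 1 ∨ seq_len ≤ (seq.toList.length : Int) ∨
    (seq_len = (seq.toList.length : Int) + 1 ∧ 1 ≤ seq.toList.length ∧ seq.toList.getLast? = some 'E')
instance (seq : String) (seq_len : Int) : Decidable (Pre_Staphylococcal_peptidase_I seq seq_len) := by
  unfold Pre_Staphylococcal_peptidase_I; infer_instance

def pvWitness_Staphylococcal_peptidase_I : String × Int := ("AEEXE", 5)

-- For seq_len == 1 with seq starting with 'E', A returns [] (its loop body is guarded by
-- i < seq_len-1), while B returns [0], the intended cleavage site consistent with A's own
-- leading-'E' rule for longer sequences.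
def D_Staphylococcal_peptidase_I (seq : String) (seq_len : Int) : Prop :=
  seq_len = 1 ∧ 1 ≤ seq.toList.length ∧ seq.toList[0]? = some 'E'
instance (seq : String) (seq_len : Int) : Decidable (D_Staphylococcal_peptidase_I seq seq_len) := by
  unfold D_Staphylococcal_peptidase_I; infer_instance

def Spec_Staphylococcal_peptidase_I (seq : String) (seq_len : Int) (out : List Int) : Prop :=
  ¬ D_Staphylococcal_peptidase_I seq seq_len → out = Staphylococcal_peptidase_I_alt seq seq_len
instance (seq : String) (seq_len : Int) (out : List Int) : Decidable (Spec_Staphylococcal_peptidase_I seq seq_len out) := by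
  unfold Spec_Staphylococcal_peptidase_I; infer_instance

def pvDiffWitness_Staphylococcal_peptidase_I : String × Int := ("E", 1)
def pvDiffWitnessOut_Staphylococcal_peptidase_I : (List Int) × (List Int) := ([], [0])

-- ===== CLAIM (what is proved, stated in full; the proofs are below) =====
def Claim_unchanged_Staphylococcal_peptidase_I : Prop := ∀ (seq : String) (seq_len : Int), Dom_Staphylococcal_peptidase_I seq seq_len → Pre_Staphylococcal_peptidase_I seq seq_len → Spec_Staphylococcal_peptidase_I seq seq_len (Staphylococcal_peptidase_I seq seq_len)
def Claim_changed_Staphylococcal_peptidase_I : Prop := Dom_Staphylococcal_peptidase_I (pvDiffWitness_Staphylococcal_peptidase_I.1) (pvDiffWitness_Staphylococcal_peptidase_I.2) ∧ Pre_Staphylococcal_peptidase_I (pvDiffWitness_Staphylococcal_peptidase_I.1) (pvDiffWitness_Staphylococcal_peptidase_I.2) ∧ D_Staphylococcal_peptidase_I (pvDiffWitness_Staphylococcal_peptidase_I.1) (pvDiffWitness_Staphylococcal_peptidase_I.2) ∧ Staphylococcal_peptidase_I (pvDiffWitness_Staphylococcal_peptidase_I.1) (pvDiffWitness_Staphylococcal_peptidase_I.2)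 = pvDiffWitnessOut_Staphylococcal_peptidase_I.1 ∧ Staphylococcal_peptidase_I_alt (pvDiffWitness_Staphylococcal_peptidase_I.1) (pvDiffWitness_Staphylococcal_peptidase_I.2) = pvDiffWitnessOut_Staphylococcal_peptidase_I.2 ∧ pvDiffWitnessOut_Staphylococcal_peptidase_I.1 ≠ pvDiffWitnessOut_Staphylococcal_peptidase_I.2
def Claim_exact_Staphylococcal_peptidase_I : Prop := ∀ (seq : String) (seq_len : Int), Dom_Staphylococcal_peptidase_I seq seq_len → Pre_Staphylococcal_peptidase_I seq seq_len → D_Staphylococcal_peptidase_I seq seq_len → Staphylococcal_peptidase_I seq seq_len ≠ Staphylococcal_peptidase_I_alt seq seq_len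

-- ===== LEMMAS AND PROOFS =====

-- generic loop/comprehension shapes
theorem pvFoldlFlatMap {α β : Type} (f : List β → α → List β) (g : α → List β)
    (h : ∀ acc x, f acc x = acc ++ g x) :
    ∀ (l : List α) (acc : List β), l.foldl f acc = acc ++ l.flatMap g
  | [], acc => by simp
  | x :: xs, acc => by
      rw [List.foldl_cons, h, pvFoldlFlatMap f g h xs]
      simp

theorem pvFlatMapMap {α β γ : Type} (f : α → β) (g : β → List γ) :
    ∀ l : List α, (l.map f).flatMap g = l.flatMap (fun x => g (f x))
  | [] => rfl
  | x :: xs => by simp [pvFlatMapMap f g xs]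

theorem pvMapFlatMap {α β γ : Type} (g : α → List β) (f : β → γ) :
    ∀ l : List α, l.flatMap (fun x => (g x).map f) = (l.flatMap g).map f
  | [] => rfl
  | x :: xs => by simp [pvMapFlatMap g f xs]

theorem pvFlatMapCongr {α β : Type} {l : List α} {f g : α → List β}
    (h : ∀ x ∈ l, f x = g x) : l.flatMap f = l.flatMap g := by
  induction l with
  | nil => rfl
  | cons x xs ih =>
      simp only [List.flatMap_cons]
      rw [h x (by simp), ih (fun y hy => h y (by simp [hy]))]

-- per-iteration contribution of A's loop body
def pvG (c : List Char) (K : Int) (i : Int) : List Int :=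
  if i < K - 1 then
    (if i = 0 ∧ PySem.List.pyGetD c i ' ' = 'E' then [i] else []) ++
    (if PySem.List.pyGetD c i ' ' ≠ 'E' ∧ PySem.List.pyGetD c (i + 1) ' ' = 'E'
      then [i + 1] else [])
  else []

-- A's contribution with a natural index, first component dropped (only nonzero at 0)
def pvE (c : List Char) (K : Int) (k : Nat) : List Int :=
  if (k : Int) < K - 1 then
    (if c.getD k ' ' ≠ 'E' ∧ c.getD (k + 1) ' ' = 'E' then [((k + 1 : Nat) : Int)] else [])
  else []

-- per-position contribution in the index characterization shared by both ports
def pvH (s : List Char) (j : Nat) : List Int :=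
  if s[j]? == some 'E' && (j == 0 || s[j - 1]? != some 'E') then [(j : Int)] else []

-- pvH with an explicit previous-character flag for position -1
def pvHp (prevE : Bool) (s : List Char) (j : Nat) : List Int :=
  if (s[j]? == some 'E') && (if j = 0 then !prevE else s[j - 1]? != some 'E')
    then [(j : Int)] else []

-- B-side proof machinery: run-scan recursion and run emission
def pvRS (prevE : Bool) (pos : Int) : List Char → List Int
  | [] => []
  | c :: xs => (if c = 'E' ∧ prevE = false then [pos] else []) ++ pvRS (c == 'E') (pos + 1) xs

def pvEmit : List (Char × Nat) → Int → List Int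
  | [], _ => []
  | (c, k) :: rs, pos => (if c = 'E' then [pos] else []) ++ pvEmit rs (pos + (k : Int))

def pvRunsFrom (c : Char) (k : Nat) : List Char → List (Char × Nat)
  | [] => [(c, k)]
  | x :: xs => if x = c then pvRunsFrom c (k + 1) xs else (c, k) :: pvRunsFrom x 1 xs

theorem pvStep (c : List Char) (K : Int) (acc : List Int) (i : Int) :
    (if i < K - 1 then
      let cleavage1 :=
        if i = 0 then
          (if PySem.List.pyGetD c i ' ' = 'E' then acc ++ [i] else acc)
        else acc
      if PySem.List.pyGetD c i ' ' ≠ 'E' then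
        (if PySem.List.pyGetD c (i + 1) ' ' = 'E' then cleavage1 ++ [i + 1] else cleavage1)
      else cleavage1
    else acc) = acc ++ pvG c K i := by
  by_cases h1 : i < K - 1
  · by_cases h2 : i = 0
    · subst h2
      by_cases h3 : PySem.List.pyGetD c 0 ' ' = 'E' <;>
        by_cases h4 : PySem.List.pyGetD c 1 ' ' = 'E' <;>
          simp [pvG, h1, h3, h4, show (1 : Int) < K from by omega]
    · by_cases h3 : PySem.List.pyGetD c i ' ' = 'E' <;>
        by_cases h4 : PySem.List.pyGetD c (i + 1) ' ' = 'E' <;>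
          simp [pvG, h1, h2, h3, h4]
  · simp [pvG, h1]

theorem pvA_eq (seq : String) (K : Int) :
    Staphylococcal_peptidase_I seq K =
      (PySem.List.pyRange 0 K 1).flatMap (pvG seq.toList K) := by
  unfold Staphylococcal_peptidase_I
  rw [pvFoldlFlatMap _ (pvG seq.toList K) (fun acc i => pvStep seq.toList K acc i)]
  simp

theorem pvA_nil (seq : String) (K : Int) (hK : K ≤ 1) :
    Staphylococcal_peptidase_I seq K = [] := by
  rw [pvA_eq]
  rw [List.flatMap_eq_nil_iff]
  intro i hi
  have hmem := (PySem.List.mem_pyRange_one).mp hi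
  simp [pvG, show ¬ (i < K - 1) by omega]

-- stage 1 of B: the append-at-the-end fold computes pvRunsFrom
theorem pvFoldRuns (l : List Char) :
    ∀ (rs : List (Char × Nat)) (c : Char) (k : Nat),
      l.foldl pvAddCh (rs ++ [(c, k)]) = rs ++ pvRunsFrom c k l := by
  induction l with
  | nil => intro rs c k; simp [pvRunsFrom]
  | cons x xs ih =>
      intro rs c k
      rw [List.foldl_cons]
      have hlast : (rs ++ [(c, k)]).getLast? = some (c, k) := by
        simp
      by_cases hx : x = c
      · subst hx
        have : pvAddCh (rs ++ [(x, k)]) x = rs ++ [(x, k + 1)] := by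
          simp [pvAddCh, hlast]
        rw [this, ih rs x (k + 1)]
        simp [pvRunsFrom]
      · have hcx : ¬ c = x := fun h => hx h.symm
        have : pvAddCh (rs ++ [(c, k)]) x = (rs ++ [(c, k)]) ++ [(x, 1)] := by
          simp [pvAddCh, hlast, hcx]
        rw [this, ih (rs ++ [(c, k)]) x 1]
        simp [pvRunsFrom, hx]

-- stage 2 of B: the (out, pos) fold computes pvEmit
theorem pvFoldEmit :
    ∀ (rs : List (Char × Nat)) (out : List Int) (pos : Int),
      (rs.foldl (fun (st : List Int × Int) r =>
          ((if r.1 = 'E' then st.1 ++ [st.2] else st.1), st.2 + (r.2 : Int))) (out, pos)).1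
        = out ++ pvEmit rs pos
  | [], out, pos => by simp [pvEmit]
  | (c, k) :: rs, out, pos => by
      by_cases hc : c = 'E' <;>
        simp [pvEmit, hc, pvFoldEmit rs _ (pos + (k : Int))]

-- emitting the runs of pvRunsFrom is the run-scan recursion
theorem pvEmitRunsFrom :
    ∀ (xs : List Char) (c : Char) (k : Nat) (pos : Int),
      pvEmit (pvRunsFrom c k xs) pos =
        (if c = 'E' then [pos] else []) ++ pvRS (c == 'E') (pos + (k : Int)) xs
  | [], c, k, pos => by simp [pvRunsFrom, pvEmit, pvRS]
  | x :: xs, c, k, pos => by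
      by_cases hx : x = c
      · subst hx
        rw [show pvRunsFrom x k (x :: xs) = pvRunsFrom x (k + 1) xs from by
          simp [pvRunsFrom]]
        rw [pvEmitRunsFrom xs x (k + 1) pos]
        have hcast : pos + ((k + 1 : Nat) : Int) = pos + (k : Int) + 1 := by push_cast; ring
        rw [hcast]
        by_cases hxE : x = 'E' <;> simp [pvRS, hxE]
      · rw [show pvRunsFrom c k (x :: xs) = (c, k) :: pvRunsFrom x 1 xs from by
          simp [pvRunsFrom, hx]]
        rw [show pvEmit ((c, k) :: pvRunsFrom x 1 xs) pos =
            (if c = 'E' then [pos] else []) ++ pvEmit (pvRunsFrom x 1 xs) (pos + (k : Int))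
          from rfl]
        rw [pvEmitRunsFrom xs x 1 (pos + (k : Int))]
        have hne : x = 'E' → ¬ (c = 'E') := fun h1 h2 => hx (h1.trans h2.symm)
        by_cases hxE : x = 'E' <;> by_cases hcE : c = 'E' <;>
          simp_all [pvRS]

-- B computes the run-scan recursion on the sliced prefix
theorem pvB_rs (seq : String) (K : Int) :
    Staphylococcal_peptidase_I_alt seq K = pvRS false 0 (seq.toList.take K.toNat) := by
  have hs : PySem.List.slice seq.toList none (some (max K 0)) = seq.toList.take K.toNat := by
    have h1 := PySem.List.slice_to seq.toList (b := max K 0) (by omega)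
    rw [h1]
    have h2 : (max K 0).toNat = K.toNat := by omega
    rw [h2]
  simp only [Staphylococcal_peptidase_I_alt]
  rw [hs]
  cases hts : seq.toList.take K.toNat with
  | nil => simp [pvRS]
  | cons c xs =>
      rw [List.foldl_cons,
        show pvAddCh [] c = [] ++ [(c, 1)] from by simp [pvAddCh],
        pvFoldRuns xs [] c 1, List.nil_append, pvFoldEmit, pvEmitRunsFrom]
      by_cases hc : c = 'E' <;> simp [pvRS, hc]

-- the run-scan recursion equals the index characterization (with prev flag and offset)
theorem pvRS_eq_flat :
    ∀ (s : List Char) (prevE : Bool) (pos : Int),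
      pvRS prevE pos s = ((List.range s.length).flatMap (pvHp prevE s)).map (· + pos)
  | [], prevE, pos => by simp [pvRS]
  | c :: xs, prevE, pos => by
      rw [show pvRS prevE pos (c :: xs) =
          (if c = 'E' ∧ prevE = false then [pos] else []) ++ pvRS (c == 'E') (pos + 1) xs
        from rfl]
      rw [pvRS_eq_flat xs (c == 'E') (pos + 1)]
      have hshift : ∀ j ∈ List.range xs.length,
          pvHp prevE (c :: xs) (j + 1) = (pvHp (c == 'E') xs j).map (· + 1) := by
        intro j _
        cases j with
        | zero =>
            by_cases hx : xs[0]? = some 'E' <;> by_cases hc : c = 'E' <;>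
              simp [pvHp, hx, hc]
        | succ m =>
            have e1 : (c :: xs)[m + 2]? = xs[m + 1]? := rfl
            have e2 : (c :: xs)[m + 1]? = xs[m]? := rfl
            by_cases hx : xs[m + 1]? = some 'E' <;> by_cases hp : xs[m]? = some 'E' <;>
              simp [pvHp, e1, e2, hx, hp] <;> push_cast <;> ring
      have hR : (List.range (xs.length + 1)).flatMap (pvHp prevE (c :: xs)) =
          pvHp prevE (c :: xs) 0 ++
            ((List.range xs.length).flatMap (pvHp (c == 'E') xs)).map (· + 1) := by
        rw [List.range_succ_eq_map, List.flatMap_cons, pvFlatMapMap, ← pvMapFlatMap]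
        congr 1
        exact pvFlatMapCongr (fun j hj => hshift j hj)
      simp only [List.length_cons]
      rw [hR, List.map_append, List.map_map]
      congr 1
      · by_cases hc : c = 'E' <;> cases prevE <;> simp [pvHp, hc]
      · apply List.map_congr_left; intro x _; simp; ring

-- the shared index characterization, closed form
theorem pvRS_eq_idx (s : List Char) :
    (List.range s.length).flatMap (pvH s) = pvRS false 0 s := by
  rw [pvRS_eq_flat s false 0]
  have h1 : ∀ j ∈ List.range s.length, pvH s j = pvHp false s j := by
    intro j _
    cases j with
    | zero => simp [pvH, pvHp]
    | succ m => simp [pvH, pvHp]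
  rw [pvFlatMapCongr h1]
  have h2 : ∀ x ∈ (List.range s.length).flatMap (pvHp false s), x + 0 = x := by
    intro x _; ring
  rw [List.map_congr_left h2, List.map_id']

theorem pvG_natCast (c : List Char) (K : Int) (k : Nat) (hk : 1 ≤ k) :
    pvG c K (k : Int) = pvE c K k := by
  have hk0 : ¬ ((k : Int) = 0) := by omega
  have h1 : ((k : Int) + 1) = ((k + 1 : Nat) : Int) := by push_cast; ring
  simp only [pvG, pvE, hk0, false_and, if_false, List.nil_append, h1,
    PySem.List.pyGetD_natCast]

theorem pvG_zero (c : List Char) (K : Int) (h : (0 : Int) < K - 1) :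
    pvG c K 0 = (if c.getD 0 ' ' = 'E' then [(0 : Int)] else []) ++ pvE c K 0 := by
  have h1 : ((0 : Int) + 1) = ((1 : Nat) : Int) := by norm_num
  simp only [pvG, pvE, if_pos h, h1, PySem.List.pyGetD_zero, PySem.List.pyGetD_natCast]
  split_ifs with g1 g2 g3 g4 g5 <;> simp_all

theorem pvTake_getElem? (c : List Char) (t j : Nat) (hjt : j < t) (hjn : j < c.length) :
    (c.take t)[j]? = some (c.getD j ' ') := by
  rw [List.getElem?_take, if_pos hjt, List.getElem?_eq_getElem hjn,
    List.getD_eq_getElem c ' ' hjn]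

theorem pvH_zero (c : List Char) (t : Nat) (h : 0 < min t c.length) :
    pvH (c.take t) 0 = (if c.getD 0 ' ' = 'E' then [(0 : Int)] else []) := by
  have hs0 := pvTake_getElem? c t 0 (by omega) (by omega)
  by_cases h1 : c.getD 0 ' ' = 'E' <;> simp [pvH, hs0, h1]

theorem pvE_eq_pvH (c : List Char) (K : Int) (t j : Nat)
    (hjK : (j : Int) < K - 1) (hj : j + 1 < min t c.length) :
    pvE c K j = pvH (c.take t) (j + 1) := by
  have hsj := pvTake_getElem? c t j (by omega) (by omega)
  have hsj1 := pvTake_getElem? c t (j + 1) (by omega) (by omega)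
  by_cases h1 : c.getD j ' ' = 'E' <;> by_cases h2 : c.getD (j + 1) ' ' = 'E' <;>
    simp_all [pvE, pvH, if_pos hjK]

theorem pvSideA (c : List Char) (K : Int) (hK : 2 ≤ K) :
    (List.range K.toNat).flatMap (fun (k : Nat) => pvG c K (k : Int)) =
      (if c.getD 0 ' ' = 'E' then [(0 : Int)] else []) ++
        (List.range K.toNat).flatMap (pvE c K) := by
  obtain ⟨t', ht⟩ : ∃ t', K.toNat = t' + 1 := ⟨K.toNat - 1, by omega⟩
  rw [ht, List.range_succ_eq_map, List.flatMap_cons, List.flatMap_cons,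
    pvFlatMapMap, pvFlatMapMap]
  have hcong :
      (List.range t').flatMap (fun (x : Nat) => pvG c K ((Nat.succ x : Nat) : Int)) =
        (List.range t').flatMap (fun (x : Nat) => pvE c K (Nat.succ x)) :=
    pvFlatMapCongr (fun j _ => pvG_natCast c K j.succ (by omega))
  rw [hcong]
  simp only [Nat.cast_zero]
  rw [pvG_zero c K (by omega), List.append_assoc]

theorem pvSideB (s : List Char) (m : Nat) (hm : s.length = m) (h1 : 1 ≤ m) :
    (List.range s.length).flatMap (pvH s) =
      pvH s 0 ++ (List.range (m - 1)).flatMap (fun j => pvH s (j + 1)) := by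
  obtain ⟨m', rfl⟩ : ∃ m', m = m' + 1 := ⟨m - 1, by omega⟩
  rw [hm, List.range_succ_eq_map, List.flatMap_cons, pvFlatMapMap]
  simp [Nat.succ_eq_add_one]

theorem pvMain (seq : String) (K : Int) (hK : 2 ≤ K)
    (hPre : Pre_Staphylococcal_peptidase_I seq K) :
    Staphylococcal_peptidase_I seq K = Staphylococcal_peptidase_I_alt seq K := by
  rw [pvA_eq, pvB_rs, ← pvRS_eq_idx]
  set c := seq.toList with hc
  rw [PySem.List.pyRange_one]
  simp only [zero_add, sub_zero]
  rw [pvFlatMapMap, pvSideA c K hK]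
  have hslen : (c.take K.toNat).length = min K.toNat c.length := by simp
  rcases hPre with h | h | h
  · omega
  · -- seq_len ≤ len(seq)
    have hcl : K ≤ (c.length : Int) := by simpa [hc] using h
    have hmin : min K.toNat c.length = K.toNat := by omega
    rw [pvSideB (c.take K.toNat) K.toNat (by rw [hslen, hmin]) (by omega)]
    rw [pvH_zero c K.toNat (by omega)]
    congr 1
    obtain ⟨t', ht⟩ : ∃ t', K.toNat = t' + 1 := ⟨K.toNat - 1, by omega⟩
    rw [ht, show t' + 1 - 1 = t' from rfl, List.range_succ, List.flatMap_append]
    have hlast : pvE c K t' = [] := by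
      simp only [pvE]
      rw [if_neg (show ¬ ((t' : Int) < K - 1) by omega)]
    simp only [List.flatMap_cons, List.flatMap_nil, hlast, List.append_nil]
    exact pvFlatMapCongr (fun j hj =>
      pvE_eq_pvH c K (t' + 1) j (by have := List.mem_range.mp hj; omega)
        (by have := List.mem_range.mp hj; omega))
  · -- seq_len = len(seq) + 1 and the last character is 'E'
    obtain ⟨hKn, hn1, hlastE⟩ := h
    have hKn' : K = (c.length : Int) + 1 := by simpa [hc] using hKn
    have hn1' : 1 ≤ c.length := by simpa [hc] using hn1
    have hlastE' : c.getLast? = some 'E' := by simpa [hc] using hlastE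
    have hgetlast : c.getD (c.length - 1) ' ' = 'E' := by
      rw [List.getLast?_eq_getElem?] at hlastE'
      have hlt : c.length - 1 < c.length := by omega
      rw [List.getElem?_eq_getElem hlt] at hlastE'
      rw [List.getD_eq_getElem c ' ' hlt]
      exact Option.some.inj hlastE'
    have hmin : min K.toNat c.length = c.length := by omega
    rw [pvSideB (c.take K.toNat) c.length (by rw [hslen, hmin]) (by omega)]
    rw [pvH_zero c K.toNat (by omega)]
    congr 1
    obtain ⟨n', hn'⟩ : ∃ n', c.length = n' + 1 := ⟨c.length - 1, by omega⟩
    have ht : K.toNat = n' + 1 + 1 := by omega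
    rw [ht, List.range_succ, List.range_succ, List.flatMap_append, List.flatMap_append]
    have h1 : pvE c K (n' + 1) = [] := by
      simp only [pvE]
      rw [if_neg (show ¬ (((n' + 1 : Nat) : Int) < K - 1) by push_cast; omega)]
    have h2 : pvE c K n' = [] := by
      have hEn : c.getD n' ' ' = 'E' := by
        rw [show n' = c.length - 1 from by omega]
        exact hgetlast
      simp only [pvE]
      rw [if_pos (show ((n' : Nat) : Int) < K - 1 by push_cast; omega)]
      rw [if_neg (show ¬ (c.getD n' ' ' ≠ 'E' ∧ c.getD (n' + 1) ' ' = 'E') from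
        fun hcon => hcon.1 hEn)]
    simp only [List.flatMap_cons, List.flatMap_nil, h1, h2, List.append_nil]
    rw [show c.length - 1 = n' from by omega]
    exact pvFlatMapCongr (fun j hj =>
      pvE_eq_pvH c K (n' + 1 + 1) j (by have := List.mem_range.mp hj; omega)
        (by have := List.mem_range.mp hj; omega))

-- ===== VERDICT (by name: the statements are the Claim_ definitions above) =====
theorem Staphylococcal_peptidase_I_spec : Claim_unchanged_Staphylococcal_peptidase_I := by
  intro seq K hDom hPre hnD
  by_cases hK : 2 ≤ K
  · exact pvMain seq K hK hPre
  · have hK1 : K ≤ 1 := by omega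
    rw [pvA_nil seq K hK1, pvB_rs, ← pvRS_eq_idx]
    by_cases hK0 : K ≤ 0
    · have ht0 : K.toNat = 0 := by omega
      simp [ht0]
    · have hKe : K = 1 := by omega
      have ht1 : K.toNat = 1 := by omega
      rw [ht1]
      rcases Nat.eq_zero_or_pos seq.toList.length with hn0 | hn0
      · have hnil : seq.toList = [] := List.length_eq_zero_iff.mp hn0
        simp [hnil]
      · have hD' : ¬ (seq.toList[0]? = some 'E') := fun h =>
          hnD ⟨hKe, hn0, h⟩
        have hD2 : ¬ (seq.toList.getD 0 ' ' = 'E') := fun h => by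
          apply hD'
          rw [List.getElem?_eq_getElem hn0, ← List.getD_eq_getElem seq.toList ' ' hn0, h]
        have hlen : (seq.toList.take 1).length = 1 := by
          rw [List.length_take]; omega
        rw [hlen]
        rw [show List.range 1 = [0] from rfl]
        simp only [List.flatMap_cons, List.flatMap_nil, List.append_nil]
        rw [pvH_zero seq.toList 1 (by omega)]
        rw [if_neg hD2]

theorem Staphylococcal_peptidase_I_changed : Claim_changed_Staphylococcal_peptidase_I := by
  unfold Claim_changed_Staphylococcal_peptidase_I; decide

theorem Staphylococcal_peptidase_I_tight : Claim_exact_Staphylococcal_peptidase_I := by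
  intro seq K hDom hPre hD
  obtain ⟨hKe, hn1, h0⟩ := hD
  rw [pvA_nil seq K (by omega), pvB_rs, ← pvRS_eq_idx]
  have ht1 : K.toNat = 1 := by omega
  rw [ht1]
  have hlen : (seq.toList.take 1).length = 1 := by
    rw [List.length_take]; omega
  rw [hlen]
  have hE : seq.toList.getD 0 ' ' = 'E' := by
    rw [List.getElem?_eq_getElem hn1] at h0
    rw [List.getD_eq_getElem seq.toList ' ' hn1]
    exact Option.some.inj h0
  rw [show List.range 1 = [0] from rfl]
  simp only [List.flatMap_cons, List.flatMap_nil, List.append_nil]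
  rw [pvH_zero seq.toList 1 (by omega)]
  rw [if_pos hE]
  simp
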